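-- pv_equiv track=rewrite | github.com/Jeremylaby/ASD_2023 | Python/asd_-_kolokwium_2/ASD - Kolokwium 2/zad7k.py | irrigation
-- ===== SOURCE A (Python) =====
-- from queue import Queue
--
-- def irrigation(T,D):
--     n=len(T)
--     m=len(T[0])
--     moves=[(-1,0),(1,0),(0,1),(0,-1)]
--     visited=[[False]*m for _ in range(n)]
--     N=[0 for _ in range(len(D))]
--     k=0
--     for tree in D:
--         Q=Queue()
--         Q.put((0,tree))
--         suma=0
--
--         while not Q.empty():
--             i,j=Q.get()
--             if not visited[i][j]:
--                 visited[i][j]=True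
--                 suma+=T[i][j]
--                 for l in range(4):
--                     x,y=moves[l]
--                     i2,j2=i+x,j+y
--                     if i2>=0 and i2<=n-1 and j2>=0 and j2<=m-1 and T[i2][j2]!=0 and not visited[i2][j2]:
--
--                         Q.put((i2,j2))
--         N[k]=suma
--         k+=1
--     return N
-- ===== SOURCE B (Python) =====
-- def irrigation(T, D):
--     # fixpoint relaxation: no queue/stack/recursion; per source, keep the set of
--     # coordinates of the current region ("active") and repeatedly sweep the whole
--     # grid, marking any unseen non-zero cell whose 4-neighbourhood touches the
--     # active set, until a full sweep changes nothing; `seen` is shared across sources.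
--     n, m = len(T), len(T[0])
--     seen = [[False] * m for _ in range(n)]
--     res = []
--     for t in D:
--         if seen[0][t]:
--             res.append(0)
--             continue
--         seen[0][t] = True
--         total = T[0][t]
--         active = {(0, t)}
--         changed = True
--         while changed:
--             changed = False
--             for i in range(n):
--                 for j in range(m):
--                     if not seen[i][j] and T[i][j] != 0 and (
--                         (i - 1, j) in active or (i + 1, j) in active
--                         or (i, j - 1) in active or (i, j + 1) in active
--                     ):
--                         seen[i][j] = True
--                         active.add((i, j))
--                         total += T[i][j]
--                         changed = True
--         res.append(total)
--     return res
-- ===== Notes on version B (the rewrite author's own statement) =====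
-- stated objective: alternative
-- what changed: Per-source BFS over a worklist queue is replaced by a worklist-free fixpoint relaxation: the current region is kept as a set of coordinate tuples and the whole grid is swept repeatedly, marking any unseen non-zero cell whose 4-neighbourhood touches that set, until a sweep changes nothing.
-- outside the precondition, e.g. on irrigation([[1, 0, 0], [0, 0]], [0]): A returns [1], B raises IndexError; on irrigation([[1, 0], [5]], [0]): A raises IndexError, B raises IndexError
import Mathlib
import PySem

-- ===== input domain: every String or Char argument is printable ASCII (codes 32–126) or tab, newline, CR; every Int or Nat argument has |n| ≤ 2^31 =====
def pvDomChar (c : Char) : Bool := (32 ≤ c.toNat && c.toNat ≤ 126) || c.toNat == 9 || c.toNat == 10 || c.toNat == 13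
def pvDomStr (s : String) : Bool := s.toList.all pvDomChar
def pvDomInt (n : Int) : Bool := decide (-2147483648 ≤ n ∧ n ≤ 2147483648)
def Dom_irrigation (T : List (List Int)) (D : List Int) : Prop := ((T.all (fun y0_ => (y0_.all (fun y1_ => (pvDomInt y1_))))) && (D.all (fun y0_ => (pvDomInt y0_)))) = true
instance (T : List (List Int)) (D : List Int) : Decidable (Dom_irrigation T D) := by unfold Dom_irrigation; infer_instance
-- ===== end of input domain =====

-- B replaces A's per-source BFS over a queue by a worklist-free fixpoint relaxation:
-- for each source, the whole grid is swept repeatedly, marking any unseen non-zero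
-- cell adjacent to a seen cell, until a sweep changes nothing; proved here: both
-- return the same list of region sums.


-- ===== shared indexing helpers (both Pythons index lists the same way) =====

/-- `xs[i]`-style wrapped index (Python semantics for indices a `pyGet?` accepts). -/
def pvIdx (len : Nat) (i : Int) : Nat := (if i < 0 then i + (len : Int) else i).toNat

/-- `visited[i][j]` read; out-of-range reads as `true` (never reached under `Pre_`). -/
def pvGet2 (V : List (List Bool)) (i j : Int) : Bool :=
  ((PySem.List.pyGet? V i).bind (fun r => PySem.List.pyGet? r j)).getD true

/-- `T[i][j]` read; out-of-range reads as `0` (never reached under `Pre_`). -/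
def pvGetT (T : List (List Int)) (i j : Int) : Int :=
  ((PySem.List.pyGet? T i).bind (fun r => PySem.List.pyGet? r j)).getD 0

/-- `visited[i][j] = True`. -/
def pvMark (V : List (List Bool)) (i j : Int) : List (List Bool) :=
  match V[pvIdx V.length i]? with
  | none => V
  | some row => V.set (pvIdx V.length i) (row.set (pvIdx row.length j) true)

/-- number of `False` entries of `visited` (termination measure only). -/
def pvCount (V : List (List Bool)) : Nat :=
  (V.map (fun r => r.countP (fun b => !b))).sum

lemma pyGet?_some_pvIdx {α : Type} (xs : List α) (i : Int) (x : α)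
    (h : PySem.List.pyGet? xs i = some x) : xs[pvIdx xs.length i]? = some x := by
  by_cases hi : 0 ≤ i
  · rw [PySem.List.pyGet?_of_nonneg xs hi] at h
    simpa [pvIdx, not_lt.mpr hi] using h
  · have hi' : i < 0 := not_le.mp hi
    have hin : PySem.Raise.InRange xs.length i := by
      by_contra hn
      rw [← PySem.List.pyGet?_eq_none_iff] at hn
      simp [hn] at h
    obtain ⟨h1, h2⟩ := hin
    set k : Nat := (-i).toNat with hk
    have hik : i = -(k : Int) := by omega
    have hkpos : 0 < k := by omega
    have hklen : k ≤ xs.length := by omega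
    rw [hik, PySem.List.pyGet?_neg_natCast xs k hkpos hklen] at h
    have : pvIdx xs.length i = xs.length - k := by
      simp only [pvIdx, if_pos hi']
      omega
    rw [this]; exact h

lemma countP_set_false (row : List Bool) (b : Nat) (h : row[b]? = some false) :
    (row.set b true).countP (fun x => !x) + 1 = row.countP (fun x => !x) := by
  induction row generalizing b with
  | nil => simp at h
  | cons a l ih =>
    cases b with
    | zero => simp_all
    | succ b' =>
      simp only [List.getElem?_cons_succ] at h
      simp only [List.set_cons_succ, List.countP_cons]
      have := ih b' h
      omega

lemma sum_map_set_nat {α : Type} (f : α → Nat) (l : List α) (a : Nat) (x : α) (h : a < l.length) :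
    ((l.set a x).map f).sum + f (l[a]) = (l.map f).sum + f x := by
  induction l generalizing a with
  | nil => simp at h
  | cons y l ih =>
    cases a with
    | zero => simp [List.map_cons]; omega
    | succ a' =>
      simp only [List.set_cons_succ, List.map_cons, List.sum_cons, List.getElem_cons_succ]
      have := ih a' (by simpa using h)
      omega

lemma pvCount_mark (V : List (List Bool)) (i j : Int) (h : pvGet2 V i j = false) :
    pvCount (pvMark V i j) + 1 = pvCount V := by
  unfold pvGet2 at h
  rcases hrow : PySem.List.pyGet? V i with _ | row
  · simp [hrow] at h
  rcases hcell : PySem.List.pyGet? row j with _ | b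
  · simp [hrow, hcell] at h
  have hb : b = false := by simp [hrow, hcell] at h; exact h
  subst hb
  have hV : V[pvIdx V.length i]? = some row := pyGet?_some_pvIdx V i row hrow
  have hr : row[pvIdx row.length j]? = some false := pyGet?_some_pvIdx row j false hcell
  have ha : pvIdx V.length i < V.length := (List.getElem?_eq_some_iff.mp hV).1
  have hVa : V[pvIdx V.length i] = row := by
    have := List.getElem?_eq_some_iff.mp hV
    exact this.2
  have hmark : pvMark V i j = V.set (pvIdx V.length i) (row.set (pvIdx row.length j) true) := by
    unfold pvMark
    rw [hV]
  rw [hmark]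
  unfold pvCount
  have hsum := sum_map_set_nat (fun r => r.countP (fun b => !b)) V (pvIdx V.length i)
      (row.set (pvIdx row.length j) true) ha
  rw [hVa] at hsum
  have hcnt := countP_set_false row (pvIdx row.length j) hr
  omega

lemma pvCount_mark_lt (V : List (List Bool)) (i j : Int) (h : pvGet2 V i j = false) :
    pvCount (pvMark V i j) < pvCount V := by
  have := pvCount_mark V i j h; omega

-- ===== PORT A ===== (literal port of the Python: per source a BFS over a FIFO
-- queue, the popped cell is tested against `visited`, then marked and summed,
-- and its four unvisited non-zero neighbours are enqueued; `N[k]` is assigned.)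

def pvMoves : List (Int × Int) := [(-1, 0), (1, 0), (0, 1), (0, -1)]

/-- one pass of `for l in range(4): … Q.put((i2,j2))`. -/
def pvEnq (T : List (List Int)) (n m : Int) (V' : List (List Bool)) (i j : Int)
    (q : List (Int × Int)) (xy : Int × Int) : List (Int × Int) :=
  let i2 := i + xy.1
  let j2 := j + xy.2
  if i2 ≥ 0 ∧ i2 ≤ n - 1 ∧ j2 ≥ 0 ∧ j2 ≤ m - 1 ∧ pvGetT T i2 j2 ≠ 0 ∧ ¬(pvGet2 V' i2 j2 = true)
  then q ++ [(i2, j2)] else q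

/-- the `while not Q.empty()` loop (queue as list, front = next `get`). -/
def pvBfs (T : List (List Int)) (n m : Int) (Q : List (Int × Int))
    (V : List (List Bool)) (s : Int) : List (List Bool) × Int :=
  match Q with
  | [] => (V, s)
  | (i, j) :: Q' =>
    if pvGet2 V i j = true then pvBfs T n m Q' V s
    else
      let V' := pvMark V i j
      pvBfs T n m (pvMoves.foldl (pvEnq T n m V' i j) Q') V' (s + pvGetT T i j)
termination_by (pvCount V, Q.length)
decreasing_by
  · exact Prod.Lex.right (pvCount V) (by simp)
  · exact Prod.Lex.left _ _ (pvCount_mark_lt V i j (by simpa using ‹¬pvGet2 V i j = true›))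

def irrigation (T : List (List Int)) (D : List Int) : List Int :=
  let n : Int := T.length
  let m : Int := (T.headD []).length
  let visited := List.replicate T.length (List.replicate (T.headD []).length false)
  let N := List.replicate D.length (0 : Int)
  (D.foldl (fun (st : List (List Bool) × List Int × Nat) tree =>
      let (V, N, k) := st
      let (V', suma) := pvBfs T n m [((0 : Int), tree)] V 0
      (V', N.set k suma, k + 1)) (visited, N, 0)).2.1
-- ===== PORT B ===== (port of Source B: per source a fixpoint relaxation — no
-- worklist: the coordinates of the current region are kept in the set `active`,
-- and the whole grid is swept repeatedly, marking any unseen non-zero cell whose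
-- 4-neighbourhood touches `active`, until a full sweep changes nothing; results
-- collected by structural recursion over D.)

/-- Source B's test `(i-1,j) in active or … or (i,j+1) in active`. -/
def pvNbAct (act : List (Int × Int)) (i j : Int) : Bool :=
  decide ((i - 1, j) ∈ act) || decide ((i + 1, j) ∈ act) ||
  decide ((i, j - 1) ∈ act) || decide ((i, j + 1) ∈ act)

/-- the body of Source B's double `for` loop, for one cell; state `(seen, active, total, changed)`. -/
def pvCell (T : List (List Int))
    (st : List (List Bool) × List (Int × Int) × Int × Bool) (c : Int × Int) :
    List (List Bool) × List (Int × Int) × Int × Bool :=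
  if pvGet2 st.1 c.1 c.2 = false ∧ pvGetT T c.1 c.2 ≠ 0 ∧ pvNbAct st.2.1 c.1 c.2 = true
  then (pvMark st.1 c.1 c.2, PySem.Set.add st.2.1 c, st.2.2.1 + pvGetT T c.1 c.2, true)
  else st

/-- the cells `for i in range(n): for j in range(m)` visits, in order. -/
def pvCells (nn mm : Nat) : List (Int × Int) :=
  (List.range nn).flatMap (fun (i : Nat) => (List.range mm).map (fun (j : Nat) => ((i : Int), (j : Int))))

/-- one full sweep of the grid (`changed = False; for i …: for j …: …`). -/
def pvSweep (T : List (List Int)) (nn mm : Nat) (V : List (List Bool))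
    (act : List (Int × Int)) (total : Int) :
    List (List Bool) × List (Int × Int) × Int × Bool :=
  List.foldl (pvCell T) (V, act, total, false) (pvCells nn mm)

lemma pvCellFold_count (T : List (List Int)) (cs : List (Int × Int)) :
    ∀ st : List (List Bool) × List (Int × Int) × Int × Bool,
      pvCount (List.foldl (pvCell T) st cs).1 ≤ pvCount st.1 ∧
      ((List.foldl (pvCell T) st cs).2.2.2 = true →
        st.2.2.2 = true ∨ pvCount (List.foldl (pvCell T) st cs).1 < pvCount st.1) := by
  induction cs with
  | nil => intro st; exact ⟨le_refl _, fun h => Or.inl h⟩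
  | cons c cs ih =>
    intro st
    rw [List.foldl_cons]
    by_cases hg : pvGet2 st.1 c.1 c.2 = false ∧ pvGetT T c.1 c.2 ≠ 0 ∧
        pvNbAct st.2.1 c.1 c.2 = true
    · have hstep : pvCell T st c =
          (pvMark st.1 c.1 c.2, PySem.Set.add st.2.1 c, st.2.2.1 + pvGetT T c.1 c.2, true) := by
        unfold pvCell; rw [if_pos hg]
      rw [hstep]
      have hlt := pvCount_mark_lt st.1 c.1 c.2 hg.1
      have h1 : pvCount (List.foldl (pvCell T)
            (pvMark st.1 c.1 c.2, PySem.Set.add st.2.1 c, st.2.2.1 + pvGetT T c.1 c.2, true) cs).1 ≤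
          pvCount (pvMark st.1 c.1 c.2) :=
        (ih (pvMark st.1 c.1 c.2, PySem.Set.add st.2.1 c, st.2.2.1 + pvGetT T c.1 c.2, true)).1
      exact ⟨by omega, fun _ => Or.inr (by omega)⟩
    · have hstep : pvCell T st c = st := by
        unfold pvCell; rw [if_neg hg]
      rw [hstep]
      exact ih st

/-- Source B's `while changed:` loop. -/
def pvLoop (T : List (List Int)) (nn mm : Nat) (V : List (List Bool))
    (act : List (Int × Int)) (total : Int) : List (List Bool) × Int :=
  if h : (pvSweep T nn mm V act total).2.2.2 = true then
    pvLoop T nn mm (pvSweep T nn mm V act total).1 (pvSweep T nn mm V act total).2.1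
      (pvSweep T nn mm V act total).2.2.1
  else ((pvSweep T nn mm V act total).1, (pvSweep T nn mm V act total).2.2.1)
termination_by pvCount V
decreasing_by
  have hc := pvCellFold_count T (pvCells nn mm) (V, act, total, false)
  rcases hc.2 h with h0 | hlt
  · cases h0
  · exact hlt

/-- one query of Source B's `for t in D:` loop. -/
def pvRegion (T : List (List Int)) (nn mm : Nat) (t : Int) (V : List (List Bool)) :
    List (List Bool) × Int :=
  if pvGet2 V 0 t = true then (V, 0)
  else pvLoop T nn mm (pvMark V 0 t) (PySem.Set.ofList [((0 : Int), t)]) (pvGetT T 0 t)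

/-- Source B's outer loop collecting `res`, threading `seen`. -/
def pvGo (T : List (List Int)) (nn mm : Nat) (D : List Int) (V : List (List Bool)) : List Int :=
  match D with
  | [] => []
  | t :: D' =>
    let r := pvRegion T nn mm t V
    r.2 :: pvGo T nn mm D' r.1

def irrigation_alt (T : List (List Int)) (D : List Int) : List Int :=
  pvGo T T.length (T.headD []).length D
    (List.replicate T.length (List.replicate (T.headD []).length false))

-- ===== PRECONDITION & SPEC =====
-- Pre_ excludes: empty grids (A raises IndexError on `T[0]`); source indices outside
-- -len(T[0]) ≤ t < len(T[0]) (A raises IndexError on `visited[0][t]`); and, for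
-- non-empty D, rows shorter than row 0 (A can raise IndexError probing `T[i2][j2]`,
-- and whether it does depends on which cells the traversal reaches, which no
-- closed-form condition can express — and B's full sweep always probes them).
-- In-range negative sources (Python's negative-index wraparound) are INSIDE Pre_.
def Pre_irrigation (T : List (List Int)) (D : List Int) : Prop :=
  T ≠ [] ∧ (∀ t ∈ D, -((T.headD []).length : Int) ≤ t ∧ t < ((T.headD []).length : Int)) ∧
    (D ≠ [] → ∀ r ∈ T, (T.headD []).length ≤ r.length)

instance (T : List (List Int)) (D : List Int) : Decidable (Pre_irrigation T D) := by
  unfold Pre_irrigation; infer_instance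

def pvWitness_irrigation : List (List Int) × List Int := ([[1, 0, 2], [3, 0, 0], [0, 5, 6]], [0, 2, -3, 1])

def Spec_irrigation (T : List (List Int)) (D : List Int) (out : List Int) : Prop := out = irrigation_alt T D
instance (T : List (List Int)) (D : List Int) (out : List Int) : Decidable (Spec_irrigation T D out) := by unfold Spec_irrigation; infer_instance

-- ===== CLAIM (what is proved, stated in full; the proofs are below) =====
def Claim_equal_irrigation : Prop := ∀ (T : List (List Int)) (D : List Int), Dom_irrigation T D → Pre_irrigation T D → Spec_irrigation T D (irrigation T D)
-- ===== LEMMAS AND PROOFS =====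

/-- a cell with both coordinates in range (`0 ≤ x < n` style). -/
def pvCanon (n m : Int) (c : Int × Int) : Prop :=
  0 ≤ c.1 ∧ c.1 < n ∧ 0 ≤ c.2 ∧ c.2 < m

/-- the four neighbours, in the order A probes them. -/
def pvAdj (c : Int × Int) : List (Int × Int) :=
  [(c.1 - 1, c.2), (c.1 + 1, c.2), (c.1, c.2 + 1), (c.1, c.2 - 1)]

/-- `V` has the dimensions of the grid `T`. -/
def pvShape (T : List (List Int)) (V : List (List Bool)) : Prop :=
  V.length = T.length ∧ ∀ r ∈ V, r.length = (T.headD []).length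

/-- the part of `Pre_` about `T` alone. -/
def pvRect (T : List (List Int)) : Prop :=
  T ≠ [] ∧ ∀ r ∈ T, (T.headD []).length ≤ r.length
/-- cells reachable from `src` walking through in-range, non-zero, unvisited cells. -/
inductive pvReach (T : List (List Int)) (V : List (List Bool)) (src : Int × Int) : (Int × Int) → Prop where
  | base : pvReach T V src src
  | step {c d : Int × Int} : pvReach T V src c → d ∈ pvAdj c →
      pvCanon (T.length : Int) ((T.headD []).length : Int) d →
      pvGetT T d.1 d.2 ≠ 0 → pvGet2 V d.1 d.2 = false → pvReach T V src d

def pvRowW (row : List Bool) (trow : List Int) : Int :=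
  ((row.zip trow).map (fun q => if q.1 then q.2 else 0)).sum

/-- total value of the visited cells. -/
def pvWeight (T : List (List Int)) (V : List (List Bool)) : Int :=
  ((V.zip T).map (fun p => pvRowW p.1 p.2)).sum

lemma pvIdx_lt {len : Nat} {i : Int} (h : PySem.Raise.InRange len i) : pvIdx len i < len := by
  obtain ⟨h1, h2⟩ := h
  unfold pvIdx
  split_ifs <;> omega

lemma pyGet?_eq_pvIdx {α : Type} (xs : List α) (i : Int) :
    PySem.List.pyGet? xs i = if PySem.Raise.InRange xs.length i then xs[pvIdx xs.length i]? else none := by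
  by_cases hin : PySem.Raise.InRange xs.length i
  · rw [if_pos hin]
    by_cases hi : 0 ≤ i
    · rw [PySem.List.pyGet?_of_nonneg xs hi]
      congr 1
      simp [pvIdx, not_lt.mpr hi]
    · have hi' : i < 0 := not_le.mp hi
      obtain ⟨h1, h2⟩ := hin
      have hik : i = -(((-i).toNat : Nat) : Int) := by omega
      rw [hik, PySem.List.pyGet?_neg_natCast xs (-i).toNat (by omega) (by omega)]
      congr 1
      unfold pvIdx
      rw [if_pos (by omega : -(((-i).toNat : Nat) : Int) < 0)]
      omega
  · rw [if_neg hin]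
    exact (PySem.List.pyGet?_eq_none_iff xs i).mpr hin

lemma pvGet2_eq_aux (V : List (List Bool)) (i j : Int) :
    pvGet2 V i j = ((if PySem.Raise.InRange V.length i then V[pvIdx V.length i]? else none).bind
      (fun r => if PySem.Raise.InRange r.length j then r[pvIdx r.length j]? else none)).getD true := by
  simp only [pvGet2, pyGet?_eq_pvIdx]

lemma pvGet2_mark_mono (V : List (List Bool)) (i j i' j' : Int)
    (h : pvGet2 V i' j' = true) : pvGet2 (pvMark V i j) i' j' = true := by
  unfold pvMark
  rcases hV : V[pvIdx V.length i]? with _ | row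
  · exact h
  rw [pvGet2_eq_aux] at h ⊢
  simp only [List.length_set]
  by_cases hin : PySem.Raise.InRange V.length i'
  · rw [if_pos hin] at h ⊢
    rw [List.getElem?_set]
    by_cases he : pvIdx V.length i = pvIdx V.length i'
    · rw [if_pos he, if_pos (he ▸ pvIdx_lt hin)]
      rw [← he, hV] at h
      simp only [Option.bind_some, List.length_set]
      simp only [Option.bind_some] at h
      by_cases hjn : PySem.Raise.InRange row.length j'
      · rw [if_pos hjn] at h ⊢
        rw [List.getElem?_set]
        by_cases hb : pvIdx row.length j = pvIdx row.length j'
        · rw [if_pos hb, if_pos (hb ▸ pvIdx_lt hjn)]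
          simp
        · rw [if_neg hb]; exact h
      · rw [if_neg hjn] at h ⊢; exact h
    · rw [if_neg he]; exact h
  · rw [if_neg hin] at h ⊢; exact h

lemma pvGet2_mark_self (V : List (List Bool)) (i j : Int)
    (h : pvGet2 V i j = false) : pvGet2 (pvMark V i j) i j = true := by
  rw [pvGet2_eq_aux] at h
  unfold pvMark
  rcases hV : V[pvIdx V.length i]? with _ | row
  · exfalso
    by_cases hin : PySem.Raise.InRange V.length i
    · rw [if_pos hin, hV] at h; simp at h
    · rw [if_neg hin] at h; simp at h
  · have hin : PySem.Raise.InRange V.length i := by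
      by_contra hc
      rw [if_neg hc] at h; simp at h
    rw [if_pos hin, hV] at h
    simp only [Option.bind_some] at h
    have hjn : PySem.Raise.InRange row.length j := by
      by_contra hc
      rw [if_neg hc] at h; simp at h
    rw [if_pos hjn] at h
    rw [pvGet2_eq_aux]
    simp only [List.length_set]
    rw [if_pos hin, List.getElem?_set, if_pos rfl, if_pos (pvIdx_lt hin)]
    simp only [Option.bind_some, List.length_set]
    rw [if_pos hjn, List.getElem?_set, if_pos rfl, if_pos (pvIdx_lt hjn)]
    simp

lemma pvIdx_natCast (len : Nat) (a : Nat) : pvIdx len (a : Int) = a := by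
  unfold pvIdx
  rw [if_neg (by omega)]
  omega

lemma pvGet2_mark_other (V : List (List Bool)) {i j i' j' : Int}
    (hi : 0 ≤ i) (hj : 0 ≤ j) (hi' : 0 ≤ i') (hj' : 0 ≤ j')
    (hne : ¬(i = i' ∧ j = j')) : pvGet2 (pvMark V i j) i' j' = pvGet2 V i' j' := by
  unfold pvMark
  rcases hV : V[pvIdx V.length i]? with _ | row
  · rfl
  rw [pvGet2_eq_aux, pvGet2_eq_aux (V := V)]
  simp only [List.length_set]
  by_cases hin : PySem.Raise.InRange V.length i'
  · rw [if_pos hin, if_pos hin, List.getElem?_set]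
    by_cases he : pvIdx V.length i = pvIdx V.length i'
    · have hii : i = i' := by
        have h1 : pvIdx V.length i = i.toNat := by unfold pvIdx; rw [if_neg (by omega)]
        have h2 : pvIdx V.length i' = i'.toNat := by unfold pvIdx; rw [if_neg (by omega)]
        omega
      have hjj : ¬ j = j' := fun hc => hne ⟨hii, hc⟩
      rw [if_pos he, if_pos (he ▸ pvIdx_lt hin)]
      rw [← he, hV]
      simp only [Option.bind_some, List.length_set]
      by_cases hjn : PySem.Raise.InRange row.length j'
      · rw [if_pos hjn, if_pos hjn, List.getElem?_set]
        have hb : ¬ pvIdx row.length j = pvIdx row.length j' := by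
          have h1 : pvIdx row.length j = j.toNat := by unfold pvIdx; rw [if_neg (by omega)]
          have h2 : pvIdx row.length j' = j'.toNat := by unfold pvIdx; rw [if_neg (by omega)]
          omega
        rw [if_neg hb]
      · rw [if_neg hjn, if_neg hjn]
    · rw [if_neg he]
  · rw [if_neg hin, if_neg hin]

lemma pvIdx_nonneg (len : Nat) {i : Int} (h : 0 ≤ i) : pvIdx len i = i.toNat := by
  unfold pvIdx; rw [if_neg (by omega)]

lemma inRange_natCast (len a : Nat) : PySem.Raise.InRange len (a : Int) ↔ a < len := by
  unfold PySem.Raise.InRange; omega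

lemma pvGet2_natCast (V : List (List Bool)) (a b : Nat) :
    pvGet2 V (a : Int) (b : Int) = ((V[a]?.bind (fun r => r[b]?)).getD true) := by
  rw [pvGet2_eq_aux]
  by_cases ha : a < V.length
  · rw [if_pos ((inRange_natCast _ _).mpr ha), pvIdx_natCast]
    congr 1
    apply Option.bind_congr
    intro r hr
    by_cases hb : b < r.length
    · rw [if_pos ((inRange_natCast _ _).mpr hb), pvIdx_natCast]
    · rw [if_neg (fun hc => hb ((inRange_natCast _ _).mp hc))]
      rw [List.getElem?_eq_none (by omega)]
  · rw [if_neg (fun hc => ha ((inRange_natCast _ _).mp hc))]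
    rw [List.getElem?_eq_none (by omega)]
    rfl

lemma pvGetT_natCast (T : List (List Int)) (a b : Nat) :
    pvGetT T (a : Int) (b : Int) = ((T[a]?.bind (fun r => r[b]?)).getD 0) := by
  unfold pvGetT
  rw [pyGet?_eq_pvIdx]
  by_cases ha : a < T.length
  · rw [if_pos ((inRange_natCast _ _).mpr ha), pvIdx_natCast]
    congr 1
    apply Option.bind_congr
    intro r hr
    rw [pyGet?_eq_pvIdx]
    by_cases hb : b < r.length
    · rw [if_pos ((inRange_natCast _ _).mpr hb), pvIdx_natCast]
    · rw [if_neg (fun hc => hb ((inRange_natCast _ _).mp hc))]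
      rw [List.getElem?_eq_none (by omega)]
  · rw [if_neg (fun hc => ha ((inRange_natCast _ _).mp hc))]
    rw [List.getElem?_eq_none (by omega)]
    rfl

lemma pvMark_shape (T : List (List Int)) (V : List (List Bool)) (i j : Int)
    (h : pvShape T V) : pvShape T (pvMark V i j) := by
  obtain ⟨h1, h2⟩ := h
  unfold pvMark
  rcases hV : V[pvIdx V.length i]? with _ | row
  · exact ⟨h1, h2⟩
  constructor
  · simpa using h1
  · intro r hr
    rcases List.mem_or_eq_of_mem_set hr with hmem | rfl
    · exact h2 r hmem
    · have hrow : row ∈ V := List.mem_of_getElem? hV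
      simpa using h2 row hrow

lemma sum_map_set_int {α : Type} (f : α → Int) (l : List α) (a : Nat) (x : α) (h : a < l.length) :
    ((l.set a x).map f).sum = (l.map f).sum + f x - f l[a] := by
  induction l generalizing a with
  | nil => simp at h
  | cons y l ih =>
    cases a with
    | zero => simp [List.map_cons]; ring
    | succ a' =>
      simp only [List.set_cons_succ, List.map_cons, List.sum_cons, List.getElem_cons_succ]
      rw [ih a' (by simpa using h)]
      ring

lemma zip_set_left {α β : Type} (l1 : List α) (l2 : List β) (a : Nat) (x : α)
    (h : a < l2.length) :
    (l1.set a x).zip l2 = (l1.zip l2).set a (x, l2[a]) := by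
  induction l1 generalizing l2 a with
  | nil => simp
  | cons y l ih =>
    cases l2 with
    | nil => simp at h
    | cons z l2' =>
      cases a with
      | zero => simp
      | succ a' =>
        simp only [List.set_cons_succ, List.zip_cons_cons, List.getElem_cons_succ]
        rw [ih l2' a' (by simpa using h)]

lemma pvRowW_set (row : List Bool) (trow : List Int) (b : Nat)
    (hb : row[b]? = some false) (hlen : row.length ≤ trow.length) :
    pvRowW (row.set b true) trow = pvRowW row trow + trow.getD b 0 := by
  induction row generalizing trow b with
  | nil => simp at hb
  | cons y l ih =>
    cases trow with
    | nil => simp at hlen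
    | cons t tr =>
      cases b with
      | zero =>
        have : y = false := by simpa using hb
        subst this
        simp [pvRowW]; ring
      | succ b' =>
        simp only [List.getElem?_cons_succ] at hb
        simp only [List.set_cons_succ, pvRowW, List.zip_cons_cons, List.map_cons, List.sum_cons,
          List.getD_cons_succ]
        have := ih tr b' hb (by simpa using hlen)
        simp only [pvRowW] at this
        omega

lemma pvWeight_mark (T : List (List Int)) (V : List (List Bool)) (c : Int × Int)
    (hRect : pvRect T) (hS : pvShape T V)
    (hc : pvCanon (T.length : Int) ((T.headD []).length : Int) c)
    (h : pvGet2 V c.1 c.2 = false) :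
    pvWeight T (pvMark V c.1 c.2) = pvWeight T V + pvGetT T c.1 c.2 := by
  obtain ⟨hS1, hS2⟩ := hS
  obtain ⟨hc1, hc2, hc3, hc4⟩ := hc
  set a := c.1.toNat with ha
  set b := c.2.toNat with hbdef
  have hca : c.1 = (a : Int) := by omega
  have hcb : c.2 = (b : Int) := by omega
  rw [hca, hcb] at h ⊢
  rw [pvGet2_natCast] at h
  have haT : a < T.length := by omega
  have haV : a < V.length := by omega
  rcases hV : V[a]? with _ | row
  · rw [hV] at h; simp at h
  rw [hV] at h
  simp only [Option.bind_some] at h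
  rcases hr : row[b]? with _ | bv
  · rw [hr] at h; simp at h
  have hbv : bv = false := by rw [hr] at h; simpa using h
  subst hbv
  have hVa : V[a] = row := by
    have h2 := List.getElem?_eq_getElem (l := V) haV
    rw [hV] at h2; injection h2 with h3; exact h3.symm
  have hrowlen : row.length = (T.headD []).length := hS2 row (List.mem_of_getElem? hV)
  have hbrow : b < row.length := by
    by_contra hbc
    rw [List.getElem?_eq_none (by omega)] at hr; cases hr
  have hTlen : (T.headD []).length ≤ T[a].length := hRect.2 T[a] (List.getElem_mem haT)
  have hmark : pvMark V (a : Int) (b : Int) = V.set a (row.set b true) := by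
    unfold pvMark
    rw [pvIdx_nonneg _ (show (0:Int) ≤ (a:Int) by omega)]
    simp only [Int.toNat_natCast, hV]
    rw [pvIdx_nonneg _ (show (0:Int) ≤ (b:Int) by omega)]
    simp only [Int.toNat_natCast]
  rw [hmark]
  unfold pvWeight
  rw [zip_set_left V T a _ haT]
  have hazip : a < (V.zip T).length := by
    rw [List.length_zip]; omega
  rw [sum_map_set_int _ _ _ _ hazip]
  have hzipa : (V.zip T)[a] = (V[a], T[a]) := List.getElem_zip
  rw [hzipa, hVa]
  simp only
  rw [pvRowW_set row T[a] b hr (by omega)]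
  have hgetT : pvGetT T (a : Int) (b : Int) = T[a].getD b 0 := by
    rw [pvGetT_natCast]
    rw [List.getElem?_eq_getElem haT]
    simp only [Option.bind_some]
    rw [List.getElem?_eq_getElem (by omega : b < T[a].length)]
    rw [List.getD_eq_getElem _ _ (by omega)]
    rfl
  rw [hgetT]
  ring

lemma pvExt (T : List (List Int)) (V1 V2 : List (List Bool))
    (h1 : pvShape T V1) (h2 : pvShape T V2)
    (h : ∀ c, pvCanon (T.length : Int) ((T.headD []).length : Int) c →
      pvGet2 V1 c.1 c.2 = pvGet2 V2 c.1 c.2) : V1 = V2 := by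
  obtain ⟨h11, h12⟩ := h1
  obtain ⟨h21, h22⟩ := h2
  apply List.ext_getElem (by omega)
  intro a ha1 ha2
  have hr1 : V1[a].length = (T.headD []).length := h12 _ (List.getElem_mem ha1)
  have hr2 : V2[a].length = (T.headD []).length := h22 _ (List.getElem_mem ha2)
  apply List.ext_getElem (by omega)
  intro b hb1 hb2
  have hcanon : pvCanon (T.length : Int) ((T.headD []).length : Int) ((a : Int), (b : Int)) := by
    unfold pvCanon; constructor
    · omega
    constructor
    · simp only; omega
    constructor
    · omega
    · simp only; omega
  have := h _ hcanon
  simp only at this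
  rw [pvGet2_natCast, pvGet2_natCast] at this
  rw [List.getElem?_eq_getElem ha1, List.getElem?_eq_getElem ha2] at this
  simp only [Option.bind_some] at this
  rw [List.getElem?_eq_getElem hb1, List.getElem?_eq_getElem hb2] at this
  simpa using this

lemma mem_pvEnq (T : List (List Int)) (n m : Int) (V' : List (List Bool)) (i j : Int)
    (q : List (Int × Int)) (xy : Int × Int) (c : Int × Int) :
    c ∈ pvEnq T n m V' i j q xy ↔ c ∈ q ∨
      (c = (i + xy.1, j + xy.2) ∧ pvCanon n m c ∧ pvGetT T c.1 c.2 ≠ 0 ∧ pvGet2 V' c.1 c.2 = false) := by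
  unfold pvEnq
  dsimp only
  split_ifs with hcond
  · simp only [List.mem_append, List.mem_singleton]
    constructor
    · rintro (hq | hq)
      · exact Or.inl hq
      · subst hq
        refine Or.inr ⟨rfl, ⟨by omega, by omega, by omega, by omega⟩, hcond.2.2.2.2.1, by
          simpa using hcond.2.2.2.2.2⟩
    · rintro (hq | ⟨rfl, _, _, _⟩)
      · exact Or.inl hq
      · exact Or.inr rfl
  · constructor
    · exact Or.inl
    · rintro (hq | ⟨rfl, hcanon, hT, hV⟩)
      · exact hq
      · exfalso
        apply hcond
        obtain ⟨h1, h2, h3, h4⟩ := hcanon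
        exact ⟨by omega, by omega, by omega, by omega, hT, by simp [hV]⟩

lemma mem_enqFold (T : List (List Int)) (n m : Int) (V' : List (List Bool)) (i j : Int)
    (q0 : List (Int × Int)) (c : Int × Int) :
    c ∈ List.foldl (pvEnq T n m V' i j) q0 pvMoves ↔
      c ∈ q0 ∨ (c ∈ pvAdj (i, j) ∧ pvCanon n m c ∧ pvGetT T c.1 c.2 ≠ 0 ∧ pvGet2 V' c.1 c.2 = false) := by
  simp only [pvMoves, List.foldl_cons, List.foldl_nil]
  rw [mem_pvEnq, mem_pvEnq, mem_pvEnq, mem_pvEnq]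
  have hadj : ∀ d : Int × Int, d ∈ pvAdj (i, j) ↔
      (d = (i + -1, j + 0) ∨ d = (i + 1, j + 0) ∨ d = (i + 0, j + 1) ∨ d = (i + 0, j + -1)) := by
    intro d
    obtain ⟨d1, d2⟩ := d
    dsimp only [pvAdj]
    simp only [List.mem_cons, List.not_mem_nil, or_false, Prod.mk.injEq]
    omega
  rw [hadj]
  tauto

lemma pvBfs_nil (T : List (List Int)) (n m : Int) (V : List (List Bool)) (s : Int) :
    pvBfs T n m [] V s = (V, s) := by
  rw [pvBfs]

lemma pvBfs_cons_vis (T : List (List Int)) (n m : Int) (i j : Int) (Q' : List (Int × Int))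
    (V : List (List Bool)) (s : Int) (h : pvGet2 V i j = true) :
    pvBfs T n m ((i, j) :: Q') V s = pvBfs T n m Q' V s := by
  rw [pvBfs]; simp [h]

lemma pvBfs_cons_unvis (T : List (List Int)) (n m : Int) (i j : Int) (Q' : List (Int × Int))
    (V : List (List Bool)) (s : Int) (h : pvGet2 V i j = false) :
    pvBfs T n m ((i, j) :: Q') V s =
      pvBfs T n m (List.foldl (pvEnq T n m (pvMark V i j) i j) Q' pvMoves)
        (pvMark V i j) (s + pvGetT T i j) := by
  rw [pvBfs]; simp [h]

lemma pvBfs_shape (T : List (List Int)) (n m : Int) (Q : List (Int × Int))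
    (V : List (List Bool)) (s : Int) :
    pvShape T V → pvShape T (pvBfs T n m Q V s).1 := by
  induction Q, V, s using pvBfs.induct T n m with
  | case1 V s => intro hS; rw [pvBfs_nil]; exact hS
  | case2 V s i j Q' hvis ih =>
    intro hS
    rw [pvBfs_cons_vis _ _ _ _ _ _ _ _ hvis]; exact ih hS
  | case3 V s i j Q' hvis V' ih =>
    intro hS
    rw [pvBfs_cons_unvis _ _ _ _ _ _ _ _ (by simpa using hvis)]
    exact ih (pvMark_shape T V i j hS)

lemma pvBfs_mono (T : List (List Int)) (n m : Int) (Q : List (Int × Int))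
    (V : List (List Bool)) (s : Int) (i' j' : Int) :
    pvGet2 V i' j' = true → pvGet2 (pvBfs T n m Q V s).1 i' j' = true := by
  induction Q, V, s using pvBfs.induct T n m with
  | case1 V s => intro h; rw [pvBfs_nil]; exact h
  | case2 V s i j Q' hvis ih =>
    intro h
    rw [pvBfs_cons_vis _ _ _ _ _ _ _ _ hvis]; exact ih h
  | case3 V s i j Q' hvis V' ih =>
    intro h
    rw [pvBfs_cons_unvis _ _ _ _ _ _ _ _ (by simpa using hvis)]
    exact ih (pvGet2_mark_mono V i j i' j' h)

lemma pvBfs_pend (T : List (List Int)) (n m : Int) (Q : List (Int × Int))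
    (V : List (List Bool)) (s : Int) (c : Int × Int) :
    c ∈ Q → pvGet2 (pvBfs T n m Q V s).1 c.1 c.2 = true := by
  induction Q, V, s using pvBfs.induct T n m with
  | case1 V s => intro h; simp at h
  | case2 V s i j Q' hvis ih =>
    intro h
    rw [pvBfs_cons_vis _ _ _ _ _ _ _ _ hvis]
    rcases List.mem_cons.mp h with rfl | h'
    · exact pvBfs_mono T n m Q' V s _ _ hvis
    · exact ih h'
  | case3 V s i j Q' hvis V' ih =>
    intro h
    have hvis' : pvGet2 V i j = false := by simpa using hvis
    rw [pvBfs_cons_unvis _ _ _ _ _ _ _ _ hvis']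
    rcases List.mem_cons.mp h with rfl | h'
    · exact pvBfs_mono T n m _ _ _ _ _ (pvGet2_mark_self V i j hvis')
    · exact ih ((mem_enqFold T n m _ i j Q' c).mpr (Or.inl h'))

lemma pvBfs_sat (T : List (List Int)) (n m : Int) (Q : List (Int × Int))
    (V : List (List Bool)) (s : Int) :
    (∀ c ∈ Q, pvCanon n m c) →
    ∀ c, pvCanon n m c → pvGet2 (pvBfs T n m Q V s).1 c.1 c.2 = true →
      pvGet2 V c.1 c.2 = false →
      ∀ d ∈ pvAdj c, pvCanon n m d → pvGetT T d.1 d.2 ≠ 0 →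
        pvGet2 (pvBfs T n m Q V s).1 d.1 d.2 = true := by
  induction Q, V, s using pvBfs.induct T n m with
  | case1 V s =>
    intro hQ c hc hres hfalse
    rw [pvBfs_nil] at hres
    simp only at hres
    rw [hres] at hfalse; cases hfalse
  | case2 V s i j Q' hvis ih =>
    intro hQ c hc hres hfalse d hd hcd hTd
    rw [pvBfs_cons_vis _ _ _ _ _ _ _ _ hvis] at hres ⊢
    exact ih (fun c hcq => hQ c (List.mem_cons_of_mem _ hcq)) c hc hres hfalse d hd hcd hTd
  | case3 V s i j Q' hvis V' ih =>
    intro hQ c hc hres hfalse d hd hcd hTd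
    have hvis' : pvGet2 V i j = false := by simpa using hvis
    rw [pvBfs_cons_unvis _ _ _ _ _ _ _ _ hvis'] at hres ⊢
    have hij : pvCanon n m (i, j) := hQ _ List.mem_cons_self
    have hQ'' : ∀ c ∈ List.foldl (pvEnq T n m (pvMark V i j) i j) Q' pvMoves, pvCanon n m c := by
      intro e he
      rcases (mem_enqFold T n m _ i j Q' e).mp he with h' | ⟨_, hcanon, _, _⟩
      · exact hQ e (List.mem_cons_of_mem _ h')
      · exact hcanon
    by_cases hv' : pvGet2 (pvMark V i j) c.1 c.2 = true
    · have hceq : c = (i, j) := by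
        by_contra hne
        rw [pvGet2_mark_other V hij.1 hij.2.2.1 hc.1 hc.2.2.1
          (fun ⟨h1, h2⟩ => hne (by
            obtain ⟨c1, c2⟩ := c
            simp only [Prod.mk.injEq]
            exact ⟨h1.symm, h2.symm⟩))] at hv'
        rw [hv'] at hfalse; cases hfalse
      subst hceq
      by_cases hdv : pvGet2 (pvMark V i j) d.1 d.2 = true
      · exact pvBfs_mono T n m _ _ _ _ _ hdv
      · apply pvBfs_pend
        exact (mem_enqFold T n m _ i j Q' d).mpr
          (Or.inr ⟨hd, hcd, hTd, by simpa using hdv⟩)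
    · exact ih hQ'' c hc hres (by simpa using hv') d hd hcd hTd

lemma pvBfs_sub (T : List (List Int)) (Q : List (Int × Int))
    (V : List (List Bool)) (s : Int) (V0 : List (List Bool)) (src : Int × Int) :
    (∀ c, pvCanon (T.length : Int) ((T.headD []).length : Int) c →
      pvGet2 V0 c.1 c.2 = true → pvGet2 V c.1 c.2 = true) →
    (∀ c, pvCanon (T.length : Int) ((T.headD []).length : Int) c →
      pvGet2 V c.1 c.2 = true → pvGet2 V0 c.1 c.2 = true ∨ pvReach T V0 src c) →
    (∀ c ∈ Q, pvCanon (T.length : Int) ((T.headD []).length : Int) c ∧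
      (pvGet2 V0 c.1 c.2 = true ∨ pvReach T V0 src c)) →
    ∀ c, pvCanon (T.length : Int) ((T.headD []).length : Int) c →
      pvGet2 (pvBfs T (T.length : Int) ((T.headD []).length : Int) Q V s).1 c.1 c.2 = true →
      pvGet2 V0 c.1 c.2 = true ∨ pvReach T V0 src c := by
  induction Q, V, s using pvBfs.induct T (T.length : Int) ((T.headD []).length : Int) with
  | case1 V s =>
    intro hmono hV hQ c hc hres
    rw [pvBfs_nil] at hres
    exact hV c hc hres
  | case2 V s i j Q' hvis ih =>
    intro hmono hV hQ c hc hres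
    rw [pvBfs_cons_vis _ _ _ _ _ _ _ _ hvis] at hres
    exact ih hmono hV (fun c hcq => hQ c (List.mem_cons_of_mem _ hcq)) c hc hres
  | case3 V s i j Q' hvis V' ih =>
    intro hmono hV hQ c hc hres
    have hvis' : pvGet2 V i j = false := by simpa using hvis
    rw [pvBfs_cons_unvis _ _ _ _ _ _ _ _ hvis'] at hres
    obtain ⟨hij, hijr⟩ := hQ _ List.mem_cons_self
    have hreach_ij : pvReach T V0 src (i, j) := by
      rcases hijr with h0 | hr
      · exfalso
        have := hmono _ hij h0
        simp only at this
        rw [this] at hvis'; cases hvis'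
      · exact hr
    have hmono' : ∀ c, pvCanon (T.length : Int) ((T.headD []).length : Int) c →
        pvGet2 V0 c.1 c.2 = true → pvGet2 (pvMark V i j) c.1 c.2 = true :=
      fun c hc h0 => pvGet2_mark_mono V i j c.1 c.2 (hmono c hc h0)
    have hV' : ∀ c, pvCanon (T.length : Int) ((T.headD []).length : Int) c →
        pvGet2 (pvMark V i j) c.1 c.2 = true →
        pvGet2 V0 c.1 c.2 = true ∨ pvReach T V0 src c := by
      intro c hc h'
      by_cases hceq : i = c.1 ∧ j = c.2
      · right
        have : c = (i, j) := by
          obtain ⟨c1, c2⟩ := c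
          simp only [Prod.mk.injEq]
          exact ⟨hceq.1.symm, hceq.2.symm⟩
        rw [this]
        exact hreach_ij
      · rw [pvGet2_mark_other V hij.1 hij.2.2.1 hc.1 hc.2.2.1 hceq] at h'
        exact hV c hc h'
    have hQ'' : ∀ c ∈ List.foldl (pvEnq T (T.length : Int) ((T.headD []).length : Int) (pvMark V i j) i j) Q' pvMoves,
        pvCanon (T.length : Int) ((T.headD []).length : Int) c ∧
          (pvGet2 V0 c.1 c.2 = true ∨ pvReach T V0 src c) := by
      intro e he
      rcases (mem_enqFold T _ _ _ i j Q' e).mp he with h' | ⟨hadj, hcanon, hTe, hVe⟩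
      · exact hQ e (List.mem_cons_of_mem _ h')
      · refine ⟨hcanon, Or.inr ?_⟩
        have h0e : pvGet2 V0 e.1 e.2 = false := by
          by_contra hcon
          have := hmono' e hcanon (by simpa using hcon)
          rw [this] at hVe; cases hVe
        exact pvReach.step hreach_ij hadj hcanon hTe h0e
    exact ih hmono' hV' hQ'' c hc hres

lemma pvBfs_sum (T : List (List Int)) (Q : List (Int × Int))
    (V : List (List Bool)) (s : Int) (hRect : pvRect T) :
    (∀ c ∈ Q, pvCanon (T.length : Int) ((T.headD []).length : Int) c) →
    pvShape T V →
    (pvBfs T (T.length : Int) ((T.headD []).length : Int) Q V s).2 =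
      s + pvWeight T (pvBfs T (T.length : Int) ((T.headD []).length : Int) Q V s).1 - pvWeight T V := by
  induction Q, V, s using pvBfs.induct T (T.length : Int) ((T.headD []).length : Int) with
  | case1 V s =>
    intro hQ hS
    rw [pvBfs_nil]
    simp
  | case2 V s i j Q' hvis ih =>
    intro hQ hS
    rw [pvBfs_cons_vis _ _ _ _ _ _ _ _ hvis]
    exact ih (fun c hcq => hQ c (List.mem_cons_of_mem _ hcq)) hS
  | case3 V s i j Q' hvis V' ih =>
    intro hQ hS
    have hvis' : pvGet2 V i j = false := by simpa using hvis
    rw [pvBfs_cons_unvis _ _ _ _ _ _ _ _ hvis']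
    have hij := hQ _ List.mem_cons_self
    have hW : pvWeight T (pvMark V i j) = pvWeight T V + pvGetT T i j :=
      pvWeight_mark T V (i, j) hRect hS hij hvis'
    have hQ'' : ∀ c ∈ List.foldl (pvEnq T (T.length : Int) ((T.headD []).length : Int) (pvMark V i j) i j) Q' pvMoves,
        pvCanon (T.length : Int) ((T.headD []).length : Int) c := by
      intro e he
      rcases (mem_enqFold T _ _ _ i j Q' e).mp he with h' | ⟨_, hcanon, _, _⟩
      · exact hQ e (List.mem_cons_of_mem _ h')
      · exact hcanon
    rw [ih hQ'' (pvMark_shape T V i j hS), hW]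
    ring

-- ===== B-side lemmas (fixpoint sweep over the active set) =====

lemma pvReach_cases (T : List (List Int)) (V : List (List Bool)) (src c : Int × Int)
    (h : pvReach T V src c) :
    c = src ∨ (pvCanon (T.length : Int) ((T.headD []).length : Int) c ∧ pvGet2 V c.1 c.2 = false) := by
  induction h with
  | base => exact Or.inl rfl
  | step _ _ hcanon _ hV _ => exact Or.inr ⟨hcanon, hV⟩

lemma pvBfs_char2 (T : List (List Int)) (V : List (List Bool)) (t : Int)
    (hfalse : pvGet2 V 0 t = false) :
    ∀ c, pvCanon (T.length : Int) ((T.headD []).length : Int) c →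
      (pvGet2 (pvBfs T (T.length : Int) ((T.headD []).length : Int) [((0 : Int), t)] V 0).1 c.1 c.2 = true ↔
        (pvGet2 (pvMark V 0 t) c.1 c.2 = true ∨ pvReach T (pvMark V 0 t) ((0 : Int), t) c)) := by
  intro c hc
  rw [pvBfs_cons_unvis _ _ _ _ _ _ _ _ hfalse]
  have hQ1 : ∀ e ∈ List.foldl (pvEnq T (T.length : Int) ((T.headD []).length : Int) (pvMark V 0 t) 0 t) [] pvMoves,
      pvCanon (T.length : Int) ((T.headD []).length : Int) e ∧
        (pvGet2 (pvMark V 0 t) e.1 e.2 = true ∨ pvReach T (pvMark V 0 t) ((0 : Int), t) e) := by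
    intro e he
    rcases (mem_enqFold T _ _ _ 0 t [] e).mp he with h0 | ⟨hadj, hcanon, hT, hV⟩
    · simp at h0
    · exact ⟨hcanon, Or.inr (pvReach.step pvReach.base hadj hcanon hT hV)⟩
  constructor
  · exact pvBfs_sub T _ (pvMark V 0 t) _ (pvMark V 0 t) ((0 : Int), t)
      (fun _ _ h => h) (fun _ _ h => Or.inl h) hQ1 c hc
  · rintro (hv | hr)
    · exact pvBfs_mono T _ _ _ _ _ _ _ hv
    · induction hr with
      | base => exact pvBfs_mono T _ _ _ _ _ _ _ (pvGet2_mark_self V 0 t hfalse)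
      | step hrc hdadj hdcanon hdT hdV ihr =>
        rename_i cmid d
        rcases pvReach_cases T (pvMark V 0 t) ((0 : Int), t) cmid hrc with hsrceq | ⟨hcm, hcmV⟩
        · apply pvBfs_pend
          rw [hsrceq] at hdadj
          exact (mem_enqFold T _ _ _ 0 t [] d).mpr (Or.inr ⟨hdadj, hdcanon, hdT, hdV⟩)
        · exact pvBfs_sat T _ _ _ (pvMark V 0 t) _ (fun e he => (hQ1 e he).1)
            cmid hcm (ihr hcm) hcmV d hdadj hdcanon hdT

lemma pvAdj_symm {c d : Int × Int} (h : d ∈ pvAdj c) : c ∈ pvAdj d := by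
  obtain ⟨c1, c2⟩ := c
  obtain ⟨d1, d2⟩ := d
  simp only [pvAdj, List.mem_cons, List.not_mem_nil, or_false, Prod.mk.injEq] at h ⊢
  omega

lemma mem_pvCells (nn mm : Nat) (c : Int × Int) :
    c ∈ pvCells nn mm ↔ pvCanon (nn : Int) (mm : Int) c := by
  unfold pvCells pvCanon
  rw [List.mem_flatMap]
  constructor
  · rintro ⟨a, ha, hc⟩
    obtain ⟨b, hb, rfl⟩ := List.mem_map.mp hc
    rw [List.mem_range] at ha hb
    exact ⟨by omega, by simp only; omega, by omega, by simp only; omega⟩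
  · rintro ⟨h1, h2, h3, h4⟩
    refine ⟨c.1.toNat, List.mem_range.mpr (by omega), List.mem_map.mpr
      ⟨c.2.toNat, List.mem_range.mpr (by omega), ?_⟩⟩
    obtain ⟨c1, c2⟩ := c
    simp only [Prod.mk.injEq]
    omega

lemma pvNbAct_true (act : List (Int × Int)) (c : Int × Int)
    (h : pvNbAct act c.1 c.2 = true) : ∃ d ∈ pvAdj c, d ∈ act := by
  simp only [pvNbAct, Bool.or_eq_true, decide_eq_true_eq] at h
  rcases h with ((hm | hm) | hm) | hm
  · exact ⟨(c.1 - 1, c.2), by simp [pvAdj], hm⟩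
  · exact ⟨(c.1 + 1, c.2), by simp [pvAdj], hm⟩
  · exact ⟨(c.1, c.2 - 1), by simp [pvAdj], hm⟩
  · exact ⟨(c.1, c.2 + 1), by simp [pvAdj], hm⟩

lemma pvNbAct_false (act : List (Int × Int)) (c : Int × Int)
    (h : pvNbAct act c.1 c.2 = false) : ∀ d ∈ pvAdj c, d ∉ act := by
  simp only [pvNbAct, Bool.or_eq_false_iff, decide_eq_false_iff_not] at h
  obtain ⟨⟨⟨h1, h2⟩, h3⟩, h4⟩ := h
  intro d hd
  simp only [pvAdj, List.mem_cons, List.not_mem_nil, or_false] at hd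
  rcases hd with rfl | rfl | rfl | rfl
  · exact h1
  · exact h2
  · exact h4
  · exact h3

/-- the loop invariant tying `seen` and `active` to the post-source state `V0`. -/
def pvInv (T : List (List Int)) (V0 : List (List Bool)) (src : Int × Int)
    (V : List (List Bool)) (act : List (Int × Int)) : Prop :=
  src ∈ act ∧
  (∀ c ∈ act, c = src ∨ (pvCanon (T.length : Int) ((T.headD []).length : Int) c ∧
    pvReach T V0 src c)) ∧
  (∀ c, pvCanon (T.length : Int) ((T.headD []).length : Int) c →
    (pvGet2 V c.1 c.2 = true ↔ (pvGet2 V0 c.1 c.2 = true ∨ c ∈ act)))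

lemma pvCellFold_inv (T : List (List Int)) (V0 : List (List Bool)) (src : Int × Int)
    (cs : List (Int × Int))
    (hcs : ∀ c ∈ cs, pvCanon (T.length : Int) ((T.headD []).length : Int) c) :
    ∀ st : List (List Bool) × List (Int × Int) × Int × Bool,
      pvInv T V0 src st.1 st.2.1 →
      pvInv T V0 src (List.foldl (pvCell T) st cs).1 (List.foldl (pvCell T) st cs).2.1 := by
  induction cs with
  | nil => intro st h; exact h
  | cons c cs ih =>
    intro st hInv
    rw [List.foldl_cons]
    by_cases hg : pvGet2 st.1 c.1 c.2 = false ∧ pvGetT T c.1 c.2 ≠ 0 ∧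
        pvNbAct st.2.1 c.1 c.2 = true
    · have hstep : pvCell T st c =
          (pvMark st.1 c.1 c.2, PySem.Set.add st.2.1 c, st.2.2.1 + pvGetT T c.1 c.2, true) := by
        unfold pvCell; rw [if_pos hg]
      rw [hstep]
      obtain ⟨hsrcmem, hact, hiff⟩ := hInv
      have hcC : pvCanon (T.length : Int) ((T.headD []).length : Int) c := hcs c List.mem_cons_self
      have hrhs : ¬(pvGet2 V0 c.1 c.2 = true ∨ c ∈ st.2.1) := by
        intro hor
        have := (hiff c hcC).mpr hor
        rw [this] at hg
        exact absurd hg.1 (by simp)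
      have hV0c : pvGet2 V0 c.1 c.2 = false := by
        cases hcase : pvGet2 V0 c.1 c.2 with
        | false => rfl
        | true => exact absurd (Or.inl hcase) hrhs
      have hreach_c : pvReach T V0 src c := by
        obtain ⟨d, hdadj, hdmem⟩ := pvNbAct_true st.2.1 c hg.2.2
        rcases hact d hdmem with hdsrc | ⟨hdc, hdr⟩
        · rw [hdsrc] at hdadj
          exact pvReach.step pvReach.base (pvAdj_symm hdadj) hcC hg.2.1 hV0c
        · exact pvReach.step hdr (pvAdj_symm hdadj) hcC hg.2.1 hV0c
      apply ih (fun e he => hcs e (List.mem_cons_of_mem _ he))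
      refine ⟨(PySem.Set.mem_add _ _ _).mpr (Or.inl hsrcmem), ?_, ?_⟩
      · intro e he
        rcases (PySem.Set.mem_add _ _ _).mp he with he' | rfl
        · exact hact e he'
        · exact Or.inr ⟨hcC, hreach_c⟩
      · intro e he
        by_cases hceq : c.1 = e.1 ∧ c.2 = e.2
        · have hec : e = c := by
            obtain ⟨e1, e2⟩ := e; obtain ⟨cc1, cc2⟩ := c
            simp only [Prod.mk.injEq]
            exact ⟨hceq.1.symm, hceq.2.symm⟩
          subst hec
          constructor
          · intro _; exact Or.inr ((PySem.Set.mem_add _ _ _).mpr (Or.inr rfl))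
          · intro _; exact pvGet2_mark_self st.1 e.1 e.2 hg.1
        · have hne : e ≠ c := by
            intro hec; rw [hec] at hceq; exact hceq ⟨rfl, rfl⟩
          rw [pvGet2_mark_other st.1 hcC.1 hcC.2.2.1 he.1 he.2.2.1 hceq]
          rw [hiff e he]
          constructor
          · rintro (h0 | hm)
            · exact Or.inl h0
            · exact Or.inr ((PySem.Set.mem_add _ _ _).mpr (Or.inl hm))
          · rintro (h0 | hm)
            · exact Or.inl h0
            · rcases (PySem.Set.mem_add _ _ _).mp hm with hm' | rfl
              · exact Or.inr hm'
              · exact absurd rfl hne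
    · have hstep : pvCell T st c = st := by
        unfold pvCell; rw [if_neg hg]
      rw [hstep]
      exact ih (fun e he => hcs e (List.mem_cons_of_mem _ he)) st hInv

lemma pvCellFold_changed (T : List (List Int)) (cs : List (Int × Int)) :
    ∀ st : List (List Bool) × List (Int × Int) × Int × Bool, st.2.2.2 = true →
      (List.foldl (pvCell T) st cs).2.2.2 = true := by
  induction cs with
  | nil => intro st h; exact h
  | cons c cs ih =>
    intro st h
    rw [List.foldl_cons]
    apply ih
    unfold pvCell
    split_ifs with hg
    · rfl
    · exact h

lemma pvCellFold_unchanged (T : List (List Int)) (cs : List (Int × Int)) :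
    ∀ st : List (List Bool) × List (Int × Int) × Int × Bool,
      (List.foldl (pvCell T) st cs).2.2.2 = false →
      List.foldl (pvCell T) st cs = st ∧
      ∀ c ∈ cs, ¬(pvGet2 st.1 c.1 c.2 = false ∧ pvGetT T c.1 c.2 ≠ 0 ∧
        pvNbAct st.2.1 c.1 c.2 = true) := by
  induction cs with
  | nil => intro st h; exact ⟨rfl, by simp⟩
  | cons c cs ih =>
    intro st h
    rw [List.foldl_cons] at h ⊢
    by_cases hg : pvGet2 st.1 c.1 c.2 = false ∧ pvGetT T c.1 c.2 ≠ 0 ∧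
        pvNbAct st.2.1 c.1 c.2 = true
    · exfalso
      have hstep : pvCell T st c =
          (pvMark st.1 c.1 c.2, PySem.Set.add st.2.1 c, st.2.2.1 + pvGetT T c.1 c.2, true) := by
        unfold pvCell; rw [if_pos hg]
      rw [hstep] at h
      rw [pvCellFold_changed T cs _ rfl] at h
      cases h
    · have hstep : pvCell T st c = st := by
        unfold pvCell; rw [if_neg hg]
      rw [hstep] at h ⊢
      obtain ⟨h1, h2⟩ := ih st h
      refine ⟨h1, ?_⟩
      intro e he
      rcases List.mem_cons.mp he with rfl | he'
      · exact hg
      · exact h2 e he'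

lemma pvSweep_unchanged (T : List (List Int)) (nn mm : Nat) (V : List (List Bool))
    (act : List (Int × Int)) (total : Int)
    (h : ¬ (pvSweep T nn mm V act total).2.2.2 = true) :
    pvSweep T nn mm V act total = (V, act, total, false) ∧
    ∀ c ∈ pvCells nn mm, ¬(pvGet2 V c.1 c.2 = false ∧ pvGetT T c.1 c.2 ≠ 0 ∧
      pvNbAct act c.1 c.2 = true) := by
  have h' : (List.foldl (pvCell T) (V, act, total, false) (pvCells nn mm)).2.2.2 = false := by
    simpa [pvSweep] using h
  obtain ⟨heq, hall⟩ := pvCellFold_unchanged T (pvCells nn mm) (V, act, total, false) h'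
  exact ⟨by simpa [pvSweep] using heq, hall⟩

lemma pvCellFold_sum (T : List (List Int)) (hRect : pvRect T) (cs : List (Int × Int))
    (hcs : ∀ c ∈ cs, pvCanon (T.length : Int) ((T.headD []).length : Int) c) :
    ∀ st : List (List Bool) × List (Int × Int) × Int × Bool, pvShape T st.1 →
      pvShape T (List.foldl (pvCell T) st cs).1 ∧
      (List.foldl (pvCell T) st cs).2.2.1 =
        st.2.2.1 + pvWeight T (List.foldl (pvCell T) st cs).1 - pvWeight T st.1 := by
  induction cs with
  | nil => intro st hS; exact ⟨hS, by simp⟩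
  | cons c cs ih =>
    intro st hS
    rw [List.foldl_cons]
    by_cases hg : pvGet2 st.1 c.1 c.2 = false ∧ pvGetT T c.1 c.2 ≠ 0 ∧
        pvNbAct st.2.1 c.1 c.2 = true
    · have hstep : pvCell T st c =
          (pvMark st.1 c.1 c.2, PySem.Set.add st.2.1 c, st.2.2.1 + pvGetT T c.1 c.2, true) := by
        unfold pvCell; rw [if_pos hg]
      rw [hstep]
      have hW : pvWeight T (pvMark st.1 c.1 c.2) = pvWeight T st.1 + pvGetT T c.1 c.2 :=
        pvWeight_mark T st.1 c hRect hS (hcs c List.mem_cons_self) hg.1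
      obtain ⟨hS', hsum'⟩ := ih (fun e he => hcs e (List.mem_cons_of_mem _ he))
        (pvMark st.1 c.1 c.2, PySem.Set.add st.2.1 c, st.2.2.1 + pvGetT T c.1 c.2, true)
        (pvMark_shape T st.1 c.1 c.2 hS)
      refine ⟨hS', ?_⟩
      rw [hsum']
      simp only
      rw [hW]
      ring
    · have hstep : pvCell T st c = st := by
        unfold pvCell; rw [if_neg hg]
      rw [hstep]
      exact ih (fun e he => hcs e (List.mem_cons_of_mem _ he)) st hS

lemma pvLoop_eq (T : List (List Int)) (nn mm : Nat) (V : List (List Bool))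
    (act : List (Int × Int)) (total : Int) :
    pvLoop T nn mm V act total =
      if (pvSweep T nn mm V act total).2.2.2 = true then
        pvLoop T nn mm (pvSweep T nn mm V act total).1 (pvSweep T nn mm V act total).2.1
          (pvSweep T nn mm V act total).2.2.1
      else ((pvSweep T nn mm V act total).1, (pvSweep T nn mm V act total).2.2.1) := by
  rw [pvLoop]
  split_ifs <;> rfl

lemma pvLoop_sum (T : List (List Int)) (hRect : pvRect T) (V : List (List Bool))
    (act : List (Int × Int)) (total : Int) :
    pvShape T V →
      pvShape T (pvLoop T T.length (T.headD []).length V act total).1 ∧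
      (pvLoop T T.length (T.headD []).length V act total).2 =
        total + pvWeight T (pvLoop T T.length (T.headD []).length V act total).1 - pvWeight T V := by
  induction V, act, total using pvLoop.induct T T.length (T.headD []).length with
  | case1 V act total h ih =>
    intro hS
    rw [pvLoop_eq, if_pos h]
    have hcs : ∀ c ∈ pvCells T.length (T.headD []).length,
        pvCanon (T.length : Int) ((T.headD []).length : Int) c :=
      fun c hc => (mem_pvCells _ _ c).mp hc
    obtain ⟨hS', hsum'⟩ := pvCellFold_sum T hRect _ hcs (V, act, total, false) hS
    obtain ⟨hS'', hsum''⟩ := ih hS'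
    refine ⟨hS'', ?_⟩
    rw [hsum'']
    have h2 : (pvSweep T T.length (T.headD []).length V act total).2.2.1 =
        total + pvWeight T (pvSweep T T.length (T.headD []).length V act total).1 - pvWeight T V := hsum'
    rw [h2]
    ring
  | case2 V act total h =>
    intro hS
    rw [pvLoop_eq, if_neg h]
    obtain ⟨heq, _⟩ := pvSweep_unchanged T _ _ _ _ _ h
    rw [heq]
    exact ⟨hS, by simp⟩

lemma pvLoop_char (T : List (List Int)) (V0 : List (List Bool)) (src : Int × Int) :
    ∀ (V : List (List Bool)) (act : List (Int × Int)) (total : Int),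
      pvInv T V0 src V act →
      ∀ c, pvCanon (T.length : Int) ((T.headD []).length : Int) c →
        (pvGet2 (pvLoop T T.length (T.headD []).length V act total).1 c.1 c.2 = true ↔
          (pvGet2 V0 c.1 c.2 = true ∨ pvReach T V0 src c)) := by
  intro V act total
  induction V, act, total using pvLoop.induct T T.length (T.headD []).length with
  | case1 V act total h ih =>
    intro hInv c hc
    rw [pvLoop_eq, if_pos h]
    have hcs : ∀ c ∈ pvCells T.length (T.headD []).length,
        pvCanon (T.length : Int) ((T.headD []).length : Int) c :=
      fun c hc => (mem_pvCells _ _ c).mp hc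
    exact ih (pvCellFold_inv T V0 src _ hcs (V, act, total, false) hInv) c hc
  | case2 V act total h =>
    intro hInv c hc
    rw [pvLoop_eq, if_neg h]
    obtain ⟨heq, hall⟩ := pvSweep_unchanged T _ _ _ _ _ h
    rw [heq]
    obtain ⟨hsrcmem, hact, hiff⟩ := hInv
    constructor
    · intro hv
      rcases (hiff c hc).mp hv with h0 | hm
      · exact Or.inl h0
      · rcases hact c hm with rfl | ⟨_, hr⟩
        · exact Or.inr pvReach.base
        · exact Or.inr hr
    · rintro (hv | hr)
      · exact (hiff c hc).mpr (Or.inl hv)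
      · induction hr with
        | base => exact (hiff _ hc).mpr (Or.inr hsrcmem)
        | step hrc hdadj hdcanon hdT hdV ihr =>
          rename_i cmid d
          have hpact : cmid ∈ act := by
            rcases pvReach_cases T V0 src cmid hrc with rfl | ⟨hcm, hcmV⟩
            · exact hsrcmem
            · have hfin := ihr hcm
              rcases (hiff cmid hcm).mp hfin with h0 | hm
              · rw [h0] at hcmV; cases hcmV
              · exact hm
          by_contra hcon
          have hdun : pvGet2 V d.1 d.2 = false := by
            cases hcase : pvGet2 V d.1 d.2 with
            | false => rfl
            | true => exact absurd hcase hcon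
          have hmem : d ∈ pvCells T.length (T.headD []).length := (mem_pvCells _ _ d).mpr hdcanon
          have h2 := hall d hmem
          simp only [not_and] at h2
          have h3 := h2 hdun hdT
          have h4 : pvNbAct act d.1 d.2 = false := by simpa using h3
          exact absurd hpact (pvNbAct_false act d h4 cmid (pvAdj_symm hdadj))

lemma bool_ext {a b : Bool} (h : a = true ↔ b = true) : a = b := by
  cases a <;> cases b <;> simp_all

lemma pvStepEq (T : List (List Int)) (V : List (List Bool)) (t : Int)
    (hRect : pvRect T) (hS : pvShape T V) :
    pvBfs T (T.length : Int) ((T.headD []).length : Int) [((0 : Int), t)] V 0 =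
        pvRegion T T.length (T.headD []).length t V ∧
      pvShape T (pvRegion T T.length (T.headD []).length t V).1 := by
  by_cases hvis : pvGet2 V 0 t = true
  · have hA : pvBfs T (T.length : Int) ((T.headD []).length : Int) [((0 : Int), t)] V 0 = (V, 0) := by
      rw [pvBfs_cons_vis _ _ _ _ _ _ _ _ hvis, pvBfs_nil]
    have hB : pvRegion T T.length (T.headD []).length t V = (V, 0) := by
      unfold pvRegion; rw [if_pos hvis]
    rw [hA, hB]
    exact ⟨rfl, hS⟩
  · have hfalse : pvGet2 V 0 t = false := by simpa using hvis
    have hB : pvRegion T T.length (T.headD []).length t V =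
        pvLoop T T.length (T.headD []).length (pvMark V 0 t)
          (PySem.Set.ofList [((0 : Int), t)]) (pvGetT T 0 t) := by
      unfold pvRegion; rw [if_neg (by simp [hfalse])]
    have hact0 : PySem.Set.ofList [((0 : Int), t)] = [((0 : Int), t)] := rfl
    have hInv0 : pvInv T (pvMark V 0 t) ((0 : Int), t) (pvMark V 0 t)
        (PySem.Set.ofList [((0 : Int), t)]) := by
      rw [hact0]
      refine ⟨List.mem_singleton_self _, ?_, ?_⟩
      · intro e he
        exact Or.inl (List.mem_singleton.mp he)
      · intro e he
        constructor
        · exact Or.inl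
        · rintro (h0 | hm)
          · exact h0
          · rcases List.mem_singleton.mp hm with rfl
            exact pvGet2_mark_self V 0 t hfalse
    have hchA := pvBfs_char2 T V t hfalse
    have hchB := pvLoop_char T (pvMark V 0 t) ((0 : Int), t) (pvMark V 0 t)
      (PySem.Set.ofList [((0 : Int), t)]) (pvGetT T 0 t) hInv0
    have hAshape : pvShape T (pvBfs T (T.length : Int) ((T.headD []).length : Int) [((0 : Int), t)] V 0).1 :=
      pvBfs_shape T _ _ _ V 0 hS
    obtain ⟨hBshape, hBsum⟩ := pvLoop_sum T hRect (pvMark V 0 t)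
      (PySem.Set.ofList [((0 : Int), t)]) (pvGetT T 0 t) (pvMark_shape T V 0 t hS)
    have hVeq : (pvBfs T (T.length : Int) ((T.headD []).length : Int) [((0 : Int), t)] V 0).1 =
        (pvLoop T T.length (T.headD []).length (pvMark V 0 t)
          (PySem.Set.ofList [((0 : Int), t)]) (pvGetT T 0 t)).1 := by
      apply pvExt T _ _ hAshape hBshape
      intro c hc
      exact bool_ext ((hchA c hc).trans (hchB c hc).symm)
    have hQc : ∀ e ∈ List.foldl (pvEnq T (T.length : Int) ((T.headD []).length : Int) (pvMark V 0 t) 0 t) [] pvMoves,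
        pvCanon (T.length : Int) ((T.headD []).length : Int) e := by
      intro e he
      rcases (mem_enqFold T _ _ _ 0 t [] e).mp he with h0 | ⟨_, hcanon, _, _⟩
      · simp at h0
      · exact hcanon
    have hsumA : (pvBfs T (T.length : Int) ((T.headD []).length : Int) [((0 : Int), t)] V 0).2 =
        0 + pvGetT T 0 t +
          pvWeight T (pvBfs T (T.length : Int) ((T.headD []).length : Int) [((0 : Int), t)] V 0).1 -
          pvWeight T (pvMark V 0 t) := by
      rw [pvBfs_cons_unvis _ _ _ _ _ _ _ _ hfalse]
      exact pvBfs_sum T _ (pvMark V 0 t) _ hRect hQc (pvMark_shape T V 0 t hS)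
    have hsum : (pvBfs T (T.length : Int) ((T.headD []).length : Int) [((0 : Int), t)] V 0).2 =
        (pvLoop T T.length (T.headD []).length (pvMark V 0 t)
          (PySem.Set.ofList [((0 : Int), t)]) (pvGetT T 0 t)).2 := by
      rw [hsumA, hBsum, hVeq]
      ring
    have hmain : pvBfs T (T.length : Int) ((T.headD []).length : Int) [((0 : Int), t)] V 0 =
        pvRegion T T.length (T.headD []).length t V := by
      rw [hB]
      exact Prod.ext hVeq hsum
    refine ⟨hmain, ?_⟩
    rw [hB]
    exact hBshape
lemma take_set (N : List Int) (k : Nat) (x : Int) (h : k < N.length) :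
    (N.set k x).take (k + 1) = N.take k ++ [x] := by
  induction N generalizing k with
  | nil => simp at h
  | cons y l ih =>
    cases k with
    | zero => simp
    | succ k' =>
      simp only [List.set_cons_succ, List.take_succ_cons, List.cons_append]
      rw [ih k' (by simpa using h)]
lemma pvGoEq (T : List (List Int)) (hRect : pvRect T) :
    ∀ (D' : List Int) (V : List (List Bool)) (N : List Int) (k : Nat),
      pvShape T V →
      k + D'.length = N.length →
      (D'.foldl (fun (st : List (List Bool) × List Int × Nat) tree =>
          let (V, N, k) := st
          let (V', suma) := pvBfs T (T.length : Int) ((T.headD []).length : Int) [((0 : Int), tree)] V 0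
          (V', N.set k suma, k + 1)) (V, N, k)).2.1 =
        N.take k ++ pvGo T T.length (T.headD []).length D' V := by
  intro D'
  induction D' with
  | nil =>
    intro V N k _ hk
    simp only [List.length_nil] at hk
    simp only [List.foldl_nil, pvGo]
    rw [List.take_of_length_le (by omega)]
    simp
  | cons t D'' ih =>
    intro V N k hS hk
    obtain ⟨hmain, hshape'⟩ := pvStepEq T V t hRect hS
    rw [List.foldl_cons]
    dsimp only
    rcases hA : pvRegion T T.length (T.headD []).length t V with ⟨V1, s1⟩
    rw [hmain, hA]
    dsimp only
    rw [ih V1 (N.set k s1) (k + 1) (by rw [hA] at hshape'; exact hshape')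
      (by simp only [List.length_set, List.length_cons] at hk ⊢; omega)]
    rw [take_set N k s1 (by simp only [List.length_cons] at hk; omega)]
    have hgo : pvGo T T.length (T.headD []).length (t :: D'') V =
        s1 :: pvGo T T.length (T.headD []).length D'' V1 := by
      rw [pvGo, hA]
    rw [hgo]
    simp

-- ===== VERDICT (by name: the statement is the Claim_ definition above) =====
theorem irrigation_spec : Claim_equal_irrigation := by
  intro T D hDom hPre
  unfold Spec_irrigation
  obtain ⟨hT, _hD, hRectCond⟩ := hPre
  rcases D with _ | ⟨t, D'⟩
  · unfold irrigation irrigation_alt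
    simp [pvGo]
  · have hRect : pvRect T := ⟨hT, hRectCond (by simp)⟩
    unfold irrigation irrigation_alt
    dsimp only
    have hshape0 : pvShape T (List.replicate T.length (List.replicate (T.headD []).length false)) := by
      constructor
      · simp
      · intro r hr
        rw [List.eq_of_mem_replicate hr]
        simp
    rw [pvGoEq T hRect (t :: D') _ _ 0 hshape0 (by simp)]
    simp
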